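-- pv_equiv track=rewrite | github.com/Myyura/Exercises | project_euler/problem/p621_Expressing an_integer_as_the_sum_of_triangular_numbers.py | two_squares
-- ===== SOURCE A (Python) =====
-- def two_squares(n, primes):
--     if n <= 1:
--         return 0
--
--     while n % 2 == 0:
--         n //= 2
--
--     if n % 4 == 3:
--         return 0
--
--     result = 1
--     for p in primes:
--         if p * p > n:
--             break
--
--         count = 0
--         while n % p == 0:
--             count += 1
--             n //= p
--         if p % 4 == 3 and count % 2 == 1:
--             return 0
--         if p % 4 == 1:
--             result *= count + 1
--
--     if n > 1:
--         result *= 2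
--     return result
-- ===== SOURCE B (Python) =====
-- def _rec(n, primes, divs):
--     """Recursively consume primes; divs is the actual list of divisors of the
--     1-mod-4 part found so far (its length is the running representation count)."""
--     if not primes:
--         return len(divs) * (2 if n > 1 else 1)
--     p = primes[0]
--     if p * p > n:
--         return len(divs) * (2 if n > 1 else 1)
--     if p % 4 == 3:
--         # strip p in squared pairs; a leftover factor of p means an odd exponent
--         while n % (p * p) == 0:
--             n //= p * p
--         if n % p == 0:
--             return 0
--     elif p % 4 == 1:
--         # grow the divisor list layer by layer instead of counting the exponent
--         layer = divs
--         while n % p == 0: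
--             n //= p
--             layer = [d * p for d in layer]
--             divs = divs + layer
--     else:
--         while n % p == 0:
--             n //= p
--     return _rec(n, primes[1:], divs)
--
--
-- def two_squares(n, primes):
--     if n <= 1:
--         return 0
--     while n % 2 == 0:
--         n //= 2
--     if n % 4 == 3:
--         return 0
--     return _rec(n, primes, [1])
-- ===== Notes on version B (the rewrite author's own statement) =====
-- stated objective: alternative
-- what changed: B keeps no exponent counters or running product at all: it recursively walks the prime list maintaining the actual list of divisors of the 1-mod-4 part (grown layer by layer, the answer is its length), and handles 3-mod-4 primes by stripping squared pairs p*p and testing one leftover divisibility instead of counting an exponent and checking its parity.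
-- outside the precondition, e.g. on two_squares(6, [0]): A returns 0, B returns 0; on two_squares(10, [5, 0]): A returns 2, B returns 2
import Mathlib
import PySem

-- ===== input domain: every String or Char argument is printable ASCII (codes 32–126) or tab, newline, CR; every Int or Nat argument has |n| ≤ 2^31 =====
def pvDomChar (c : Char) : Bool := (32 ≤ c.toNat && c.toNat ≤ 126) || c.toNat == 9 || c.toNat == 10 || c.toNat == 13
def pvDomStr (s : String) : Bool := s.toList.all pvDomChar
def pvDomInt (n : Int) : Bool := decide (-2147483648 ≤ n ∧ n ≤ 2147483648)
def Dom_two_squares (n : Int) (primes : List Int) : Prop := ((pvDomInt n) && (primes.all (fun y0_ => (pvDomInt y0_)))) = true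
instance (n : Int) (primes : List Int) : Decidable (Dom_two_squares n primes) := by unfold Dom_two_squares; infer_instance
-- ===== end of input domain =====

-- B keeps no exponent counters or running product: it recursively walks the prime list maintaining
-- the actual divisor list of the 1-mod-4 part (answer = its length) and strips 3-mod-4 primes in
-- squared pairs with one leftover divisibility test (objective: alternative).

-- ===== PORT A =====
-- while n % 2 == 0: n //= 2   (fuel = n.natAbs is enough on every admitted input: each step halves |n|)
def twoSqA_strip2 (fuel : Nat) (n : Int) : Int :=
  match fuel with
  | 0 => n
  | f + 1 => if PySem.Int.mod n 2 = 0 then twoSqA_strip2 f (PySem.Int.floordiv n 2) else n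

-- count = 0; while n % p == 0: count += 1; n //= p   → (count, n)
def twoSqA_divOut (fuel : Nat) (p n : Int) : Int × Int :=
  match fuel with
  | 0 => (0, n)
  | f + 1 =>
    if PySem.Int.mod n p = 0 then
      let r := twoSqA_divOut f p (PySem.Int.floordiv n p)
      (r.1 + 1, r.2)
    else (0, n)

-- the 'for p in primes' loop carrying (n, result), ending with the residual *2 rule
def twoSqA_loop (primes : List Int) (n result : Int) : Int :=
  match primes with
  | [] => if n > 1 then result * 2 else result
  | p :: rest =>
    if p * p > n then (if n > 1 then result * 2 else result)
    else
      let r := twoSqA_divOut n.natAbs p n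
      if PySem.Int.mod p 4 = 3 ∧ PySem.Int.mod r.1 2 = 1 then 0
      else if PySem.Int.mod p 4 = 1 then twoSqA_loop rest r.2 (result * (r.1 + 1))
      else twoSqA_loop rest r.2 result

def two_squares (n : Int) (primes : List Int) : Int :=
  if n ≤ 1 then 0
  else
    let n1 := twoSqA_strip2 n.natAbs n
    if PySem.Int.mod n1 4 = 3 then 0
    else twoSqA_loop primes n1 1

-- ===== PORT B =====
-- while n % (p*p) == 0: n //= p*p
def twoSqB_pairLoop (fuel : Nat) (p n : Int) : Int :=
  match fuel with
  | 0 => n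
  | f + 1 =>
    if PySem.Int.mod n (p * p) = 0 then twoSqB_pairLoop f p (PySem.Int.floordiv n (p * p)) else n

-- while n % p == 0: n //= p; layer = [d * p for d in layer]; divs = divs + layer
def twoSqB_layerLoop (fuel : Nat) (p n : Int) (layer divs : List Int) : List Int × Int :=
  match fuel with
  | 0 => (divs, n)
  | f + 1 =>
    if PySem.Int.mod n p = 0 then
      twoSqB_layerLoop f p (PySem.Int.floordiv n p) (layer.map (· * p)) (divs ++ layer.map (· * p))
    else (divs, n)

-- while n % p == 0: n //= p   (else branch)
def twoSqB_stripLoop (fuel : Nat) (p n : Int) : Int :=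
  match fuel with
  | 0 => n
  | f + 1 => if PySem.Int.mod n p = 0 then twoSqB_stripLoop f p (PySem.Int.floordiv n p) else n

def twoSqB_rec (primes : List Int) (n : Int) (divs : List Int) : Int :=
  match primes with
  | [] => (divs.length : Int) * (if n > 1 then 2 else 1)
  | p :: rest =>
    if p * p > n then (divs.length : Int) * (if n > 1 then 2 else 1)
    else if PySem.Int.mod p 4 = 3 then
      let m := twoSqB_pairLoop n.natAbs p n
      if PySem.Int.mod m p = 0 then 0 else twoSqB_rec rest m divs
    else if PySem.Int.mod p 4 = 1 then
      let r := twoSqB_layerLoop n.natAbs p n divs divs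
      twoSqB_rec rest r.2 r.1
    else twoSqB_rec rest (twoSqB_stripLoop n.natAbs p n) divs

def twoSqB_strip2 (fuel : Nat) (n : Int) : Int :=
  match fuel with
  | 0 => n
  | f + 1 => if PySem.Int.mod n 2 = 0 then twoSqB_strip2 f (PySem.Int.floordiv n 2) else n

def two_squares_alt (n : Int) (primes : List Int) : Int :=
  if n ≤ 1 then 0
  else
    let n1 := twoSqB_strip2 n.natAbs n
    if PySem.Int.mod n1 4 = 3 then 0
    else twoSqB_rec primes n1 [1]

-- ===== PRECONDITION & SPEC =====
-- Pre_ excludes lists containing 0, 1 or -1 unless A returns before its prime loop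
-- (n <= 1, or n % 4 == 3 so the odd part is ≡ 3 mod 4): when the loop reaches such a p
-- it raises ZeroDivisionError (p = 0) or loops forever (p = ±1); a few excluded inputs
-- still return in A because an earlier prime breaks the loop first (see cites).
def Pre_two_squares (n : Int) (primes : List Int) : Prop :=
  n ≤ 1 ∨ PySem.Int.mod n 4 = 3 ∨
    ((0 : Int) ∉ primes ∧ (1 : Int) ∉ primes ∧ (-1 : Int) ∉ primes)
instance (n : Int) (primes : List Int) : Decidable (Pre_two_squares n primes) := by
  unfold Pre_two_squares; infer_instance

def pvWitness_two_squares : Int × List Int := (325, [2, 3, 5, 7, 11, 13])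

def Spec_two_squares (n : Int) (primes : List Int) (out : Int) : Prop := out = two_squares_alt n primes
instance (n : Int) (primes : List Int) (out : Int) : Decidable (Spec_two_squares n primes out) := by unfold Spec_two_squares; infer_instance

-- ===== CLAIM (what is proved, stated in full; the proofs are below) =====
def Claim_equal_two_squares : Prop := ∀ (n : Int) (primes : List Int), Dom_two_squares n primes → Pre_two_squares n primes → Spec_two_squares n primes (two_squares n primes)

-- ===== LEMMAS AND PROOFS =====

theorem pvFloordivMul (p k : Int) (hp : p ≠ 0) : PySem.Int.floordiv (p * k) p = k := by
  have h0 : PySem.Int.mod (p * k) p = 0 := (PySem.Int.mod_eq_zero_iff_dvd _ _).2 ⟨k, rfl⟩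
  have := PySem.Int.floordiv_mul_add_mod (p * k) p
  have h2 : PySem.Int.floordiv (p * k) p * p = p * k := by omega
  exact mul_right_cancel₀ hp (h2.trans (mul_comm p k))

theorem pvStep (n p : Int) (hp : 2 ≤ p.natAbs) (hn : n ≠ 0) (h : PySem.Int.mod n p = 0) :
    (PySem.Int.floordiv n p).natAbs < n.natAbs ∧ PySem.Int.floordiv n p ≠ 0 := by
  have hq := PySem.Int.floordiv_mul_add_mod n p
  set q := PySem.Int.floordiv n p with hqd
  have hnq : n = q * p := by omega
  have hq0 : q ≠ 0 := by intro h0; rw [h0] at hnq; simp at hnq; omega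
  have habs : n.natAbs = q.natAbs * p.natAbs := by rw [hnq, Int.natAbs_mul]
  exact ⟨by nlinarith [Int.natAbs_pos.mpr hq0], hq0⟩

-- the two strip-2 loops are literally the same recursion
theorem twoSqB_strip2_eq (fuel : Nat) (n : Int) : twoSqB_strip2 fuel n = twoSqA_strip2 fuel n := by
  induction fuel generalizing n with
  | zero => rfl
  | succ f ih => simp [twoSqB_strip2, twoSqA_strip2, ih]

theorem twoSqA_strip2_pos (fuel : Nat) (n : Int) (hn : 0 < n) : 0 < twoSqA_strip2 fuel n := by
  induction fuel generalizing n with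
  | zero => exact hn
  | succ f ih =>
    simp only [twoSqA_strip2]
    split_ifs with h
    · refine ih _ ?_
      obtain ⟨k, hk⟩ := (PySem.Int.mod_eq_zero_iff_dvd _ _).1 h
      rw [hk, pvFloordivMul 2 k (by omega)]; omega
    · exact hn

theorem twoSqA_strip2_odd (fuel : Nat) (n : Int) (h : PySem.Int.mod n 2 ≠ 0) :
    twoSqA_strip2 fuel n = n := by
  cases fuel with
  | zero => rfl
  | succ f =>
    simp only [twoSqA_strip2]
    rw [if_neg h]

theorem twoSqA_divOut_ne_zero (fuel : Nat) (p n : Int) (hp : 2 ≤ p.natAbs) (hn : n ≠ 0) :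
    (twoSqA_divOut fuel p n).2 ≠ 0 := by
  induction fuel generalizing n with
  | zero => exact hn
  | succ f ih =>
    simp only [twoSqA_divOut]
    split_ifs with h
    · exact ih _ (pvStep n p hp hn h).2
    · exact hn

-- with sufficient fuel the result is independent of the fuel
theorem twoSqA_divOut_fuel (p : Int) (hp : 2 ≤ p.natAbs) :
    ∀ (fuel fuel' : Nat) (n : Int), n ≠ 0 → n.natAbs ≤ fuel → n.natAbs ≤ fuel' →
      twoSqA_divOut fuel p n = twoSqA_divOut fuel' p n := by
  intro fuel
  induction fuel with
  | zero => intro fuel' n hn h _; omega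
  | succ f ih =>
    intro fuel' n hn h h'
    cases fuel' with
    | zero => omega
    | succ f' =>
      simp only [twoSqA_divOut]
      split_ifs with hm
      · obtain ⟨hlt, hne⟩ := pvStep n p hp hn hm
        rw [ih f' _ hne (by omega) (by omega)]
      · rfl

-- with sufficient fuel the final value is no longer divisible by p
theorem twoSqA_divOut_not_dvd (fuel : Nat) (p n : Int) (hp : 2 ≤ p.natAbs) (hn : n ≠ 0)
    (hf : n.natAbs ≤ fuel) : PySem.Int.mod (twoSqA_divOut fuel p n).2 p ≠ 0 := by
  induction fuel generalizing n with
  | zero => omega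
  | succ f ih =>
    simp only [twoSqA_divOut]
    split_ifs with h
    · obtain ⟨hlt, hne⟩ := pvStep n p hp hn h
      exact ih _ hne (by omega)
    · exact h

-- B's layered divisor growth tracks A's exponent count: same final n, length = divs + count*layer
theorem twoSqB_layer_sim (fuel : Nat) (p : Int) :
    ∀ (n : Int) (layer divs : List Int),
      (twoSqB_layerLoop fuel p n layer divs).2 = (twoSqA_divOut fuel p n).2 ∧
      ((twoSqB_layerLoop fuel p n layer divs).1.length : Int)
        = divs.length + (twoSqA_divOut fuel p n).1 * layer.length := by
  induction fuel with
  | zero => intro n layer divs; simp [twoSqB_layerLoop, twoSqA_divOut]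
  | succ f ih =>
    intro n layer divs
    simp only [twoSqB_layerLoop, twoSqA_divOut]
    split_ifs with h
    · obtain ⟨h1, h2⟩ := ih (PySem.Int.floordiv n p) (layer.map (· * p))
        (divs ++ layer.map (· * p))
      refine ⟨h1, ?_⟩
      rw [h2]; simp; ring
    · simp

-- B's plain strip loop is A's count loop without the count
theorem twoSqB_strip_sim (fuel : Nat) (p : Int) : ∀ (n : Int),
    twoSqB_stripLoop fuel p n = (twoSqA_divOut fuel p n).2 := by
  induction fuel with
  | zero => intro n; rfl
  | succ f ih =>
    intro n
    simp only [twoSqB_stripLoop, twoSqA_divOut]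
    split_ifs with h
    · exact ih _
    · rfl

-- B's squared-pair stripping vs A's count: leaves A's final n, times p exactly when the count is odd
theorem twoSqB_pair_sim (p : Int) (hp : 2 ≤ p.natAbs) :
    ∀ (fuel : Nat) (n : Int), n ≠ 0 → n.natAbs ≤ fuel →
      twoSqB_pairLoop fuel p n =
        (if PySem.Int.mod (twoSqA_divOut fuel p n).1 2 = 1
         then (twoSqA_divOut fuel p n).2 * p else (twoSqA_divOut fuel p n).2) := by
  intro fuel
  induction fuel using Nat.strong_induction_on with
  | _ fuel ih =>
    intro n hn hf
    have hp0 : p ≠ 0 := by omega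
    cases fuel with
    | zero => omega
    | succ f =>
      simp only [twoSqB_pairLoop]
      by_cases hpp : PySem.Int.mod n (p * p) = 0
      · rw [if_pos hpp]
        obtain ⟨k, hk⟩ := (PySem.Int.mod_eq_zero_iff_dvd _ _).1 hpp
        have hk0 : k ≠ 0 := by intro h; rw [h, mul_zero] at hk; exact hn hk
        have hn2 : PySem.Int.floordiv n (p * p) = k := by
          rw [hk]; exact pvFloordivMul (p * p) k (mul_ne_zero hp0 hp0)
        have hm1 : PySem.Int.mod n p = 0 :=
          (PySem.Int.mod_eq_zero_iff_dvd _ _).2 ⟨p * k, by rw [hk]; ring⟩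
        have hfd1 : PySem.Int.floordiv n p = p * k := by
          rw [hk, show p * p * k = p * (p * k) by ring, pvFloordivMul p _ hp0]
        have hm2 : PySem.Int.mod (p * k) p = 0 :=
          (PySem.Int.mod_eq_zero_iff_dvd _ _).2 ⟨k, rfl⟩
        have h1 := pvStep n p hp hn hm1
        rw [hfd1] at h1
        have h2 := pvStep (p * k) p hp h1.2 hm2
        rw [pvFloordivMul p k hp0] at h2
        -- unfold A's count loop twice
        cases f with
        | zero => omega
        | succ f' =>
          have hkf : k.natAbs ≤ f' := by omega
          have hrw : twoSqA_divOut (f' + 1 + 1) p n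
              = ((twoSqA_divOut f' p k).1 + 1 + 1, (twoSqA_divOut f' p k).2) := by
            simp only [twoSqA_divOut, if_pos hm1, hfd1, if_pos hm2, pvFloordivMul p k hp0]
          rw [hrw, hn2]
          rw [ih (f' + 1) (by omega) k hk0 (by omega)]
          rw [twoSqA_divOut_fuel p hp (f' + 1) f' k hk0 (by omega) hkf]
          have hpar : PySem.Int.mod ((twoSqA_divOut f' p k).1 + 1 + 1) 2
              = PySem.Int.mod (twoSqA_divOut f' p k).1 2 := by
            rw [PySem.Int.mod_eq_emod_of_pos (by omega : (0:Int) < 2),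
              PySem.Int.mod_eq_emod_of_pos (by omega : (0:Int) < 2)]
            omega
          rw [hpar]
      · rw [if_neg hpp]
        by_cases hm : PySem.Int.mod n p = 0
        · obtain ⟨k, hk⟩ := (PySem.Int.mod_eq_zero_iff_dvd _ _).1 hm
          have hk0 : k ≠ 0 := by intro h; rw [h, mul_zero] at hk; exact hn hk
          have hfd : PySem.Int.floordiv n p = k := by rw [hk]; exact pvFloordivMul p k hp0
          have hmk : PySem.Int.mod k p ≠ 0 := by
            intro h
            apply hpp
            obtain ⟨j, hj⟩ := (PySem.Int.mod_eq_zero_iff_dvd _ _).1 h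
            exact (PySem.Int.mod_eq_zero_iff_dvd _ _).2 ⟨j, by rw [hk, hj]; ring⟩
          have hdk : twoSqA_divOut f p k = (0, k) := by
            cases f with
            | zero => rfl
            | succ f' =>
              simp only [twoSqA_divOut]
              rw [if_neg hmk]
          have hrw : twoSqA_divOut (f + 1) p n = (1, k) := by
            simp only [twoSqA_divOut, if_pos hm, hfd, hdk]
            norm_num
          rw [hrw]
          norm_num
          rw [hk]; ring
        · have hrw : twoSqA_divOut (f + 1) p n = (0, n) := by
            simp only [twoSqA_divOut]
            rw [if_neg hm]
          rw [hrw]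
          norm_num

-- the main simulation: B's recursion with the divisor list vs A's loop with the running product
theorem twoSq_rec_eq (primes : List Int) : ∀ (n : Int) (divs : List Int), n ≠ 0 →
    (∀ p ∈ primes, 2 ≤ p.natAbs) →
    twoSqB_rec primes n divs = twoSqA_loop primes n (divs.length : Int) := by
  induction primes with
  | nil =>
    intro n divs hn hpr
    simp only [twoSqB_rec, twoSqA_loop]
    split_ifs <;> ring
  | cons p rest ih =>
    intro n divs hn hpr
    have hp : 2 ≤ p.natAbs := hpr p List.mem_cons_self
    have hrest : ∀ q ∈ rest, 2 ≤ q.natAbs := fun q hq => hpr q (List.mem_cons_of_mem _ hq)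
    simp only [twoSqB_rec, twoSqA_loop]
    by_cases hbr : p * p > n
    · rw [if_pos hbr, if_pos hbr]
      split_ifs <;> ring
    · rw [if_neg hbr, if_neg hbr]
      have hne := twoSqA_divOut_ne_zero n.natAbs p n hp hn
      have hnd := twoSqA_divOut_not_dvd n.natAbs p n hp hn le_rfl
      by_cases hp3 : PySem.Int.mod p 4 = 3
      · rw [if_pos hp3, twoSqB_pair_sim p hp n.natAbs n hn le_rfl]
        by_cases hodd : PySem.Int.mod (twoSqA_divOut n.natAbs p n).1 2 = 1
        · rw [if_pos hodd]
          have hdm : PySem.Int.mod ((twoSqA_divOut n.natAbs p n).2 * p) p = 0 :=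
            (PySem.Int.mod_eq_zero_iff_dvd _ _).2 ⟨(twoSqA_divOut n.natAbs p n).2, mul_comm _ _⟩
          rw [if_pos hdm, if_pos ⟨hp3, hodd⟩]
        · rw [if_neg hodd, if_neg hnd,
            if_neg (fun h => hodd h.2 :
              ¬(PySem.Int.mod p 4 = 3 ∧ PySem.Int.mod (twoSqA_divOut n.natAbs p n).1 2 = 1)),
            if_neg (by rw [hp3]; omega : ¬ PySem.Int.mod p 4 = 1)]
          exact ih _ divs hne hrest
      · rw [if_neg hp3,
          if_neg (fun h => hp3 h.1 :
            ¬(PySem.Int.mod p 4 = 3 ∧ PySem.Int.mod (twoSqA_divOut n.natAbs p n).1 2 = 1))]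
        by_cases hp1 : PySem.Int.mod p 4 = 1
        · rw [if_pos hp1, if_pos hp1]
          obtain ⟨hL2, hLl⟩ := twoSqB_layer_sim n.natAbs p n divs divs
          rw [hL2, ih _ _ hne hrest, hLl,
            show ((divs.length : Int) + (twoSqA_divOut n.natAbs p n).1 * divs.length)
              = (divs.length : Int) * ((twoSqA_divOut n.natAbs p n).1 + 1) by ring]
        · rw [if_neg hp1, if_neg hp1, twoSqB_strip_sim]
          exact ih _ divs hne hrest

-- ===== VERDICT (by name: the statement is the Claim_ definition above) =====
theorem two_squares_spec : Claim_equal_two_squares := by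
  intro n primes _ hpre
  unfold Spec_two_squares
  simp only [two_squares, two_squares_alt, twoSqB_strip2_eq]
  split_ifs with h1 h4
  · rfl
  · rfl
  · -- main branch: n > 1, odd part not 3 mod 4
    rcases hpre with hp | hp | hp
    · omega
    · -- n % 4 == 3: n is odd so the strip loop leaves n and A would have returned 0
      exfalso
      have hodd : PySem.Int.mod n 2 ≠ 0 := by
        rw [PySem.Int.mod_eq_emod_of_pos (a := n) (by omega : (0:Int) < 2)]
        rw [PySem.Int.mod_eq_emod_of_pos (a := n) (by omega : (0:Int) < 4)] at hp
        omega
      rw [twoSqA_strip2_odd _ _ hodd] at h4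
      exact h4 hp
    · refine ((twoSq_rec_eq primes _ [1] ?_ ?_).trans ?_).symm
      · exact ne_of_gt (twoSqA_strip2_pos _ _ (by omega))
      · intro p hpmem
        obtain ⟨h0, hone, hneg⟩ := hp
        have e0 : p ≠ 0 := by rintro rfl; exact h0 hpmem
        have e1 : p ≠ 1 := by rintro rfl; exact hone hpmem
        have e2 : p ≠ -1 := by rintro rfl; exact hneg hpmem
        omega
      · norm_num
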